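-- pv_equiv track=rewrite | github.com/AngheloAlf/Programacion-CIAC-2019 | intensivos/12/Code/p1.py | sismosEnCiudad
-- ===== SOURCE A (Python) =====
-- def sismosOrdenados(sismos):
--     # Como nos piden usar una generar una lista ordenada, usaremos el
--     # metodo lista.sort() .
--     # Para ello, debemos poner como primer elemento de las tuplas el
--     # elemento por el cual queremos ordenar la lista.
--     lista_auxiliar = []
--     for ciudad, fecha, escala in sismos:
--         # Aqui recorremos la lista con el objetivo de poner la escala
--         # richter como primer elemento de cada tupla y almacenarlo
--         # en una lista nueva.
--         tupla = (escala, fecha, ciudad)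
--         lista_auxiliar.append(tupla)
--
--     # Una vez tenemos el elemento importante en la primera posicion,
--     # usamos el lista.sort() para ordenar dicha lista
--     lista_auxiliar.sort()
--     # Como sabemos que lista.sort() ordena de menor a mayor, invertimos
--     # la lista para que quede ordenada de mayor a menor, tal cual como
--     # nos pide el enunciado.
--     lista_auxiliar.reverse()
--
--     # Finalmente, recorremos nuestra nueva lista ordenada, con el objetivo
--     # de organizar los valores de las tuplas en el orden original.
--     tembloresOrdenados = list()
--     for escala, fecha, ciudad in lista_auxiliar:
--         tupla = (ciudad, fecha, escala)
--         tembloresOrdenados.append(tupla)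
--     return tembloresOrdenados
--
-- def sismosEnCiudad(sismos, ciudad):
--     # Como sabemos que nos piden que los sismos de cada ciudad deben
--     # estar ordenados, los ordenaremos antes de empezar a procesarlos.
--     # De esta forma, cuando estemos trabajando con ellos, no tendremos
--     # que preocuparnos de ordenarlos.
--     ordenados = sismosOrdenados(sismos)
--
--     listaCiudad = list()
--     for ciudad_temblor, fecha, escala in ordenados:
--         # Recorremos los sismos en cuestion en busca de todos los que
--         # hayan ocurrido en la ciudad indicada
--         if ciudad_temblor == ciudad:
--             # Si la ciudad del temblor es la misma que la que nos indican,
--             # agregaremos la fecha y la escala unicamente a la lista de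
--             # sismos de dicha ciudad
--             tupla = (fecha, escala)
--             listaCiudad.append(tupla)
--     return listaCiudad
-- ===== SOURCE B (Python) =====
-- def sismosEnCiudad(sismos, ciudad):
--     # Filter first, then sort only the city's records, descending by (escala, fecha).
--     sub = [(escala, fecha) for c, fecha, escala in sismos if c == ciudad]
--     sub.sort(reverse=True)
--     return [(fecha, escala) for escala, fecha in sub]
-- ===== Notes on version B (the rewrite author's own statement) =====
-- stated objective: simpler
-- what changed: B filters the requested city's records first and sorts only that subset descending by (escala, fecha) with one sorted(reverse=True) call, instead of A's tuple-rearrange, sort-everything, reverse, rearrange-back and then filter.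
import Mathlib
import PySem

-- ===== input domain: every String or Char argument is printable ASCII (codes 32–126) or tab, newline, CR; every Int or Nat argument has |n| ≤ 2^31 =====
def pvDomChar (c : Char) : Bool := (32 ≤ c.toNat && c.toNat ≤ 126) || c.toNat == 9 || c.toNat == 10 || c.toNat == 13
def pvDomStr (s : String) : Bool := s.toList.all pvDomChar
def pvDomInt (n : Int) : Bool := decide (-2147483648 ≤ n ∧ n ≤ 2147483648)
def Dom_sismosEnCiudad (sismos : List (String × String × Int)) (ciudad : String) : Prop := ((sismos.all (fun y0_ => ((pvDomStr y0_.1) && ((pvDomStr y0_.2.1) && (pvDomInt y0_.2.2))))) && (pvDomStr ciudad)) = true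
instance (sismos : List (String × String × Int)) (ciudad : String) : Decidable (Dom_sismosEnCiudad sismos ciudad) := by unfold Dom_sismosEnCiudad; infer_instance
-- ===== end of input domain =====

-- B filters the requested city first and sorts only that subset descending by (escala, fecha),
-- instead of A's sort-everything-then-reverse-then-filter; return values agree everywhere.

-- ===== PORT A =====
-- Python tuple comparison '<' on the (escala, fecha, ciudad) triples lista.sort() compares.
def pyLt3 (a b : Int × String × String) : Bool :=
  decide (a.1 < b.1) || (!decide (b.1 < a.1) &&
    (decide (a.2.1 < b.2.1) || (!decide (b.2.1 < a.2.1) && decide (a.2.2 < b.2.2))))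

def sismosOrdenados (sismos : List (String × String × Int)) : List (String × String × Int) :=
  let lista_auxiliar := sismos.foldl (fun acc t => acc ++ [(t.2.2, t.2.1, t.1)]) []
  -- lista_auxiliar.sort(): Python's stable sort, as the stable insertion sort PySem uses for sorting
  let sortedAux := lista_auxiliar.foldl (fun acc x => PySem.List.insertBy pyLt3 x acc) []
  -- lista_auxiliar.reverse()
  let inverted := sortedAux.reverse
  inverted.foldl (fun acc t => acc ++ [(t.2.2, t.2.1, t.1)]) []

def sismosEnCiudad (sismos : List (String × String × Int)) (ciudad : String) : List (String × Int) :=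
  let ordenados := sismosOrdenados sismos
  ordenados.foldl (fun acc t => if t.1 == ciudad then acc ++ [(t.2.1, t.2.2)] else acc) []

-- ===== PORT B =====
def sismosEnCiudad_alt (sismos : List (String × String × Int)) (ciudad : String) : List (String × Int) :=
  let sub := (sismos.filter (fun t => t.1 == ciudad)).map (fun t => (t.2.2, t.2.1))
  -- sub.sort(reverse=True) on (escala, fecha) pairs
  let subSorted := PySem.List.sorted2 sub (fun p => p.1) (fun p => p.2) true
  subSorted.map (fun p => (p.2, p.1))

-- ===== PRECONDITION & SPEC =====
def Spec_sismosEnCiudad (sismos : List (String × String × Int)) (ciudad : String) (out : List (String × Int)) : Prop := out = sismosEnCiudad_alt sismos ciudad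
instance (sismos : List (String × String × Int)) (ciudad : String) (out : List (String × Int)) : Decidable (Spec_sismosEnCiudad sismos ciudad out) := by unfold Spec_sismosEnCiudad; infer_instance

-- ===== CLAIM (what is proved, stated in full; the proofs are below) =====
def Claim_equal_sismosEnCiudad : Prop := ∀ (sismos : List (String × String × Int)) (ciudad : String), Dom_sismosEnCiudad sismos ciudad → Spec_sismosEnCiudad sismos ciudad (sismosEnCiudad sismos ciudad)

-- ===== LEMMAS AND PROOFS =====

-- insertBy inserts: the result is a permutation of x :: ys
theorem perm_insertBy {α : Type} (before : α → α → Bool) (x : α) (ys : List α) :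
    (PySem.List.insertBy before x ys).Perm (x :: ys) := by
  induction ys with
  | nil => simp [PySem.List.insertBy]
  | cons y ys ih =>
    simp only [PySem.List.insertBy]
    split
    · exact List.Perm.refl _
    · exact (ih.cons y).trans (List.Perm.swap x y ys)

theorem perm_foldl_insertBy {α : Type} (before : α → α → Bool) (xs : List α) :
    ∀ acc : List α, (xs.foldl (fun a x => PySem.List.insertBy before x a) acc).Perm (xs ++ acc) := by
  induction xs with
  | nil => intro acc; simp
  | cons x xs ih =>
    intro acc
    simp only [List.foldl_cons, List.cons_append]
    exact ((ih _).trans ((perm_insertBy before x acc).append_left xs)).trans List.perm_middle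

-- insertion sort with a transitive, asymmetric 'before' yields a list pairwise NOT-before-backwards
theorem pairwise_insertBy {α : Type} (before : α → α → Bool)
    (htrans : ∀ a b c, before a b = true → before b c = true → before a c = true)
    (hasym : ∀ a b, before a b = true → before b a = false)
    (x : α) (ys : List α) (h : ys.Pairwise (fun a b => before b a = false)) :
    (PySem.List.insertBy before x ys).Pairwise (fun a b => before b a = false) := by
  induction ys with
  | nil => simp [PySem.List.insertBy]
  | cons y ys ih =>
    rcases List.pairwise_cons.1 h with ⟨hy, hys⟩
    simp only [PySem.List.insertBy]
    split
    · rename_i hxy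
      refine List.pairwise_cons.2 ⟨?_, h⟩
      intro z hz
      rcases hz with _ | hz
      · exact hasym x y hxy
      · cases hzx : before z x with
        | false => rfl
        | true =>
          have := htrans z x y hzx hxy
          rw [hy z (by assumption)] at this
          exact absurd this (by simp)
    · rename_i hxy
      refine List.pairwise_cons.2 ⟨?_, ih hys⟩
      intro z hz
      rcases (PySem.List.mem_insertBy before x z ys).1 hz with rfl | hz
      · simpa using hxy
      · exact hy z hz

theorem pairwise_foldl_insertBy {α : Type} (before : α → α → Bool)
    (htrans : ∀ a b c, before a b = true → before b c = true → before a c = true)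
    (hasym : ∀ a b, before a b = true → before b a = false)
    (xs : List α) :
    ∀ acc : List α, acc.Pairwise (fun a b => before b a = false) →
      (xs.foldl (fun a x => PySem.List.insertBy before x a) acc).Pairwise (fun a b => before b a = false) := by
  induction xs with
  | nil => intro acc h; simpa using h
  | cons x xs ih =>
    intro acc h
    exact ih _ (pairwise_insertBy before htrans hasym x acc h)

-- decode the Bool comparators into Props
theorem pyLt3_true_iff (a b : Int × String × String) :
    pyLt3 a b = true ↔
      a.1 < b.1 ∨ (¬ b.1 < a.1 ∧ (a.2.1 < b.2.1 ∨ (¬ b.2.1 < a.2.1 ∧ a.2.2 < b.2.2))) := by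
  simp only [pyLt3, Bool.or_eq_true, Bool.and_eq_true, Bool.not_eq_true',
    decide_eq_true_eq, decide_eq_false_iff_not]

theorem pyLt3_false_iff (a b : Int × String × String) :
    pyLt3 a b = false ↔
      ¬ a.1 < b.1 ∧ (b.1 < a.1 ∨ (¬ a.2.1 < b.2.1 ∧ (b.2.1 < a.2.1 ∨ ¬ a.2.2 < b.2.2))) := by
  simp only [pyLt3, Bool.or_eq_false_iff, Bool.and_eq_false_iff, Bool.not_eq_false',
    decide_eq_true_eq, decide_eq_false_iff_not]

def before2 (a b : Int × String) : Bool :=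
  decide (b.1 < a.1) || (!decide (a.1 < b.1) && decide (b.2 < a.2))

theorem before2_true_iff (a b : Int × String) :
    before2 a b = true ↔ b.1 < a.1 ∨ (¬ a.1 < b.1 ∧ b.2 < a.2) := by
  simp only [before2, Bool.or_eq_true, Bool.and_eq_true, Bool.not_eq_true',
    decide_eq_true_eq, decide_eq_false_iff_not]

theorem before2_false_iff (a b : Int × String) :
    before2 a b = false ↔ ¬ b.1 < a.1 ∧ (a.1 < b.1 ∨ ¬ b.2 < a.2) := by
  simp only [before2, Bool.or_eq_false_iff, Bool.and_eq_false_iff, Bool.not_eq_false',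
    decide_eq_true_eq, decide_eq_false_iff_not]

theorem pyLt3_trans (a b c : Int × String × String)
    (hab : pyLt3 a b = true) (hbc : pyLt3 b c = true) : pyLt3 a c = true := by
  rw [pyLt3_true_iff] at hab hbc ⊢
  rcases hab with h | ⟨h1, h⟩ <;> rcases hbc with g | ⟨g1, g⟩
  · exact Or.inl (h.trans g)
  · exact Or.inl (lt_of_lt_of_le h (le_of_not_gt g1))
  · exact Or.inl (lt_of_le_of_lt (le_of_not_gt h1) g)
  · refine Or.inr ⟨fun hc => absurd (lt_of_lt_of_le hc ((le_of_not_gt h1).trans (le_of_not_gt g1))) (lt_irrefl _), ?_⟩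
    rcases h with h | ⟨h1', h⟩ <;> rcases g with g | ⟨g1', g⟩
    · exact Or.inl (h.trans g)
    · exact Or.inl (lt_of_lt_of_le h (le_of_not_gt g1'))
    · exact Or.inl (lt_of_le_of_lt (le_of_not_gt h1') g)
    · exact Or.inr ⟨fun hc => absurd (lt_of_lt_of_le hc ((le_of_not_gt h1').trans (le_of_not_gt g1'))) (lt_irrefl _), h.trans g⟩

theorem pyLt3_asym (a b : Int × String × String)
    (hab : pyLt3 a b = true) : pyLt3 b a = false := by
  rw [pyLt3_true_iff] at hab
  rw [pyLt3_false_iff]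
  rcases hab with h | ⟨h1, h⟩
  · exact ⟨lt_asymm h, Or.inl h⟩
  · refine ⟨h1, ?_⟩
    rcases h with h | ⟨h1', h⟩
    · exact Or.inr ⟨lt_asymm h, Or.inl h⟩
    · exact Or.inr ⟨h1', Or.inr (lt_asymm h)⟩

theorem before2_trans (a b c : Int × String)
    (hab : before2 a b = true) (hbc : before2 b c = true) : before2 a c = true := by
  rw [before2_true_iff] at hab hbc ⊢
  rcases hab with h | ⟨h1, h⟩ <;> rcases hbc with g | ⟨g1, g⟩
  · exact Or.inl (g.trans h)
  · exact Or.inl (lt_of_le_of_lt (le_of_not_gt g1) h)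
  · exact Or.inl (lt_of_lt_of_le g (le_of_not_gt h1))
  · exact Or.inr ⟨fun hc => absurd (lt_of_lt_of_le hc ((le_of_not_gt g1).trans (le_of_not_gt h1))) (lt_irrefl _), g.trans h⟩

theorem before2_asym (a b : Int × String)
    (hab : before2 a b = true) : before2 b a = false := by
  rw [before2_true_iff] at hab
  rw [before2_false_iff]
  rcases hab with h | ⟨h1, h⟩
  · exact ⟨lt_asymm h, Or.inl h⟩
  · exact ⟨h1, Or.inr (lt_asymm h)⟩

-- the descending output order both programs produce, on (fecha, escala) pairs
def descFE (a b : String × Int) : Prop := b.2 < a.2 ∨ (b.2 = a.2 ∧ b.1 ≤ a.1)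

theorem descFE_antisymm : ∀ a b : String × Int, descFE a b → descFE b a → a = b := by
  rintro ⟨f1, e1⟩ ⟨f2, e2⟩ h1 h2
  rcases h1 with h1 | ⟨h1e, h1f⟩ <;> rcases h2 with h2 | ⟨h2e, h2f⟩
  · exact absurd h2 (lt_asymm h1)
  · exact absurd h1 (h2e ▸ lt_irrefl _)
  · exact absurd h2 (h1e ▸ lt_irrefl _)
  · exact Prod.ext (le_antisymm h2f h1f) h1e.symm

theorem sismosEnCiudad_spec_aux (sismos : List (String × String × Int)) (ciudad : String) :
    sismosEnCiudad sismos ciudad = sismosEnCiudad_alt sismos ciudad := by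
  set p : (String × String × Int) → Bool := fun t => t.1 == ciudad with hp
  -- A side rewritten as map/filter of its insertion sort
  have hA : sismosEnCiudad sismos ciudad =
      ((((sismos.map (fun t => (t.2.2, t.2.1, t.1))).foldl
          (fun acc x => PySem.List.insertBy pyLt3 x acc) []).reverse.filter
            (fun x => x.2.2 == ciudad)).map (fun x => (x.2.1, x.1))) := by
    show (sismosOrdenados sismos).foldl _ [] = _
    rw [PySem.List.foldl_append_if]
    show [] ++ _ = _
    rw [List.nil_append]
    unfold sismosOrdenados
    simp only [PySem.List.foldl_append_singleton_eq_map, List.nil_append]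
    rw [List.filter_map, List.map_map]
    rfl
  -- B side: unfold sorted2 into its insertion-sort fold
  have hB : sismosEnCiudad_alt sismos ciudad =
      (((sismos.filter p).map (fun t => (t.2.2, t.2.1))).foldl
          (fun acc x => PySem.List.insertBy before2 x acc) []).map (fun q => (q.2, q.1)) := by
    unfold sismosEnCiudad_alt
    simp only [PySem.List.sorted2]
    rfl
  rw [hA, hB]
  set L := sismos.map (fun t => (t.2.2, t.2.1, t.1)) with hL
  set SA := (L.foldl (fun acc x => PySem.List.insertBy pyLt3 x acc) []) with hSA
  set SB := (((sismos.filter p).map (fun t => (t.2.2, t.2.1))).foldl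
      (fun acc x => PySem.List.insertBy before2 x acc) []) with hSB
  -- both sides are permutations of the same list of (fecha, escala) pairs
  have hpermA : ((SA.reverse.filter (fun x => x.2.2 == ciudad)).map
      (fun x : Int × String × String => (x.2.1, x.1))).Perm
      ((sismos.filter p).map (fun t => (t.2.1, t.2.2))) := by
    have h1 : SA.Perm L := by simpa using perm_foldl_insertBy pyLt3 L []
    have hrev : SA.reverse.Perm L := (SA.reverse_perm).trans h1
    have h2 := hrev.filter (fun x => x.2.2 == ciudad)
    have hLf : L.filter (fun x => x.2.2 == ciudad)
        = (sismos.filter p).map (fun t => (t.2.2, t.2.1, t.1)) := by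
      rw [hL, List.filter_map]
      rfl
    rw [hLf] at h2
    have := h2.map (fun x : Int × String × String => (x.2.1, x.1))
    simpa [List.map_map, Function.comp] using this
  have hpermB : (SB.map (fun q : Int × String => (q.2, q.1))).Perm
      ((sismos.filter p).map (fun t => (t.2.1, t.2.2))) := by
    have h1 : SB.Perm ((sismos.filter p).map (fun t => (t.2.2, t.2.1))) := by
      simpa using perm_foldl_insertBy before2 _ []
    have := h1.map (fun q : Int × String => (q.2, q.1))
    simpa [List.map_map, Function.comp] using this
  -- both sides are Pairwise descFE
  have hsortA : ((SA.reverse.filter (fun x => x.2.2 == ciudad)).map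
      (fun x : Int × String × String => (x.2.1, x.1))).Pairwise descFE := by
    have h1 : SA.Pairwise (fun a b => pyLt3 b a = false) :=
      pairwise_foldl_insertBy pyLt3 pyLt3_trans pyLt3_asym L [] List.Pairwise.nil
    have h2 : SA.reverse.Pairwise (fun a b => pyLt3 a b = false) :=
      List.pairwise_reverse.2 h1
    have h3 : (SA.reverse.filter (fun x => x.2.2 == ciudad)).Pairwise
        (fun a b => pyLt3 a b = false) :=
      h2.sublist List.filter_sublist
    rw [List.pairwise_map]
    refine List.Pairwise.imp_of_mem ?_ h3
    intro a b ha hb hab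
    simp only [descFE]
    have hac : a.2.2 = ciudad := by
      have := List.of_mem_filter ha; simpa using this
    have hbc : b.2.2 = ciudad := by
      have := List.of_mem_filter hb; simpa using this
    rw [pyLt3_false_iff] at hab
    obtain ⟨hn1, hrest⟩ := hab
    by_cases hba : b.1 < a.1
    · exact Or.inl hba
    · have he : b.1 = a.1 := le_antisymm (le_of_not_gt hn1) (le_of_not_gt hba)
      refine Or.inr ⟨he, ?_⟩
      rcases hrest with h | ⟨hn2, _⟩
      · exact absurd h hba
      · exact le_of_not_gt hn2
  have hsortB : (SB.map (fun q : Int × String => (q.2, q.1))).Pairwise descFE := by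
    have h1 : SB.Pairwise (fun a b => before2 b a = false) :=
      pairwise_foldl_insertBy before2 before2_trans before2_asym _ [] List.Pairwise.nil
    rw [List.pairwise_map]
    refine h1.imp ?_
    intro a b hab
    simp only [descFE]
    rw [before2_false_iff] at hab
    obtain ⟨hn1, hrest⟩ := hab
    by_cases hba : b.1 < a.1
    · exact Or.inl hba
    · rcases hrest with h | h
      · exact absurd h hba
      · exact Or.inr ⟨le_antisymm (le_of_not_gt hn1) (le_of_not_gt hba), le_of_not_gt h⟩
  exact List.Perm.eq_of_pairwise
    (fun a b _ _ hab hba => descFE_antisymm a b hab hba)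
    hsortA hsortB (hpermA.trans hpermB.symm)

-- ===== VERDICT (by name: the statement is the Claim_ definition above) =====
theorem sismosEnCiudad_spec : Claim_equal_sismosEnCiudad := by
  intro sismos ciudad _
  exact sismosEnCiudad_spec_aux sismos ciudad
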